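-- pv_equiv track=rewrite | github.com/suresh-krish/computative_programming | 03-recursion_onlyevendigits-Python/recursion_onlyevendigits.py | string_red
-- ===== SOURCE A (Python) =====
-- def string_red(s,stlen,stind,news):
-- 	if(stind>=stlen):
-- 		if(len(news) == 0):
-- 			return "0"
-- 		else:
-- 			return news
-- 	if(int(s[stind])%2 == 0):
-- 		news =news+s[stind]
--
-- 	return string_red(s,stlen,stind+1,news)
-- ===== SOURCE B (Python) =====
-- def string_red(s, stlen, stind, news):
--     for i in range(stind, stlen):
--         if int(s[i]) % 2 == 0:
--             news = news + s[i]
--     return "0" if len(news) == 0 else news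
-- ===== Notes on version B (the rewrite author's own statement) =====
-- stated objective: simpler
-- what changed: Replaces the tail recursion (one Python call frame per index) by a single explicit for-loop over range(stind, stlen) with a string accumulator, keeping the '0' default for an empty result.
import Mathlib
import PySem

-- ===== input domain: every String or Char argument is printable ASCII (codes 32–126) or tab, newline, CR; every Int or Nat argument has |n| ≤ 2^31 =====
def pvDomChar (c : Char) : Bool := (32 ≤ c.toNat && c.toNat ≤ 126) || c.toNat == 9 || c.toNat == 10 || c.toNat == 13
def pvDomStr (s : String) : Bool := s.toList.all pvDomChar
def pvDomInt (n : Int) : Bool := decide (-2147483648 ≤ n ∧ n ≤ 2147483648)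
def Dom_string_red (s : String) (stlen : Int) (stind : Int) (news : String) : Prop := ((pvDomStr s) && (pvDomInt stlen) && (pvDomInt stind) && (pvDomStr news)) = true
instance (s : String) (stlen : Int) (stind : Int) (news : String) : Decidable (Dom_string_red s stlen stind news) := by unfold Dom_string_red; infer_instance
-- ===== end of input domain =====

-- B replaces A's tail recursion by one explicit for-loop over range(stind, stlen); objective: simpler.

-- ===== PORT A =====
-- A, literally: recursion on stind; int(s[stind]) raises on a bad index or a
-- non-digit character — those inputs are excluded by Pre_ (the port keeps news
-- unchanged there, a value nothing is claimed about).
def stringRedAux (s : List Char) (stlen : Int) (stind : Int) (news : List Char) : List Char :=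
  if stind ≥ stlen then
    if news.length = 0 then ['0'] else news
  else
    let news' :=
      match PySem.List.pyGet? s stind with
      | none => news                       -- IndexError in Python; outside Pre_
      | some c =>
        match PySem.Int.ofChars? [c] with
        | none => news                     -- ValueError in Python; outside Pre_
        | some n => if PySem.Int.mod n 2 = 0 then news ++ [c] else news
    stringRedAux s stlen (stind + 1) news'
  termination_by (stlen - stind).toNat
  decreasing_by omega

def string_red (s : String) (stlen : Int) (stind : Int) (news : String) : String :=
  String.ofList (stringRedAux s.toList stlen stind news.toList)

-- ===== PORT B =====
-- B, literally: fold the loop body over range(stind, stlen), then the default.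
def stringRedStep (s : List Char) (acc : List Char) (i : Int) : List Char :=
  match PySem.List.pyGet? s i with
  | none => acc                            -- IndexError in Python; outside Pre_
  | some c =>
    match PySem.Int.ofChars? [c] with
    | none => acc                          -- ValueError in Python; outside Pre_
    | some n => if PySem.Int.mod n 2 = 0 then acc ++ [c] else acc

def string_red_alt (s : String) (stlen : Int) (stind : Int) (news : String) : String :=
  let r := (PySem.List.pyRange stind stlen 1).foldl (stringRedStep s.toList) news.toList
  String.ofList (if r.length = 0 then ['0'] else r)

-- ===== PRECONDITION & SPEC =====
-- Pre_: either no index is visited, or every visited i in range(stind, stlen)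
-- is a valid (possibly negative) index of s and s[i] is a decimal digit —
-- exactly where Python A returns (else IndexError/ValueError). The explicit
-- bounds keep the range small so the condition evaluates.
def Pre_string_red (s : String) (stlen : Int) (stind : Int) (news : String) : Prop :=
  stlen ≤ stind ∨
    (-(s.toList.length : Int) ≤ stind ∧ stlen ≤ (s.toList.length : Int) ∧
     ((PySem.List.pyRange stind stlen 1).all (fun i =>
        match PySem.List.pyGet? s.toList i with
        | some c => c.isDigit
        | none => false)) = true)
instance (s : String) (stlen : Int) (stind : Int) (news : String) : Decidable (Pre_string_red s stlen stind news) := by unfold Pre_string_red; infer_instance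

def pvWitness_string_red : String × Int × Int × String := ("1234", 4, 0, "")

def Spec_string_red (s : String) (stlen : Int) (stind : Int) (news : String) (out : String) : Prop := out = string_red_alt s stlen stind news
instance (s : String) (stlen : Int) (stind : Int) (news : String) (out : String) : Decidable (Spec_string_red s stlen stind news out) := by unfold Spec_string_red; infer_instance

-- ===== CLAIM (what is proved, stated in full; the proofs are below) =====
def Claim_equal_string_red : Prop := ∀ (s : String) (stlen : Int) (stind : Int) (news : String), Dom_string_red s stlen stind news → Pre_string_red s stlen stind news → Spec_string_red s stlen stind news (string_red s stlen stind news)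

-- ===== LEMMAS AND PROOFS =====

-- A's recursion computes B's fold followed by B's empty-default (for any inputs).
lemma stringRedAux_eq_foldl (s : List Char) (stlen : Int) :
    ∀ (n : Nat) (stind : Int) (news : List Char), (stlen - stind).toNat = n →
      stringRedAux s stlen stind news =
        (let r := (PySem.List.pyRange stind stlen 1).foldl (stringRedStep s) news
         if r.length = 0 then ['0'] else r) := by
  intro n
  induction n with
  | zero =>
    intro stind news h
    have hge : stind ≥ stlen := by omega
    rw [stringRedAux, if_pos hge, PySem.List.pyRange_one_eq_nil (by omega)]
    simp
  | succ k ih =>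
    intro stind news h
    have hlt : stind < stlen := by omega
    rw [stringRedAux, if_neg (by omega), PySem.List.pyRange_one_cons hlt]
    simp only [List.foldl_cons]
    exact ih (stind + 1) _ (by omega)

-- ===== VERDICT (by name: the statement is the Claim_ definition above) =====
theorem string_red_spec : Claim_equal_string_red := by
  intro s stlen stind news _ _
  unfold Spec_string_red string_red string_red_alt
  rw [stringRedAux_eq_foldl s.toList stlen (stlen - stind).toNat stind news.toList rfl]
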